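-- pv_equiv track=rewrite | github.com/mrinalmanu/class_assignments | Task_7.py | brackets22
-- ===== SOURCE A (Python) =====
-- import itertools
--
-- def brackets22(m, n):
--
--     # Another failed attempt at making brackets22()
--
--     ell = ()
--     if m == 0:
--        ell = ("".join(seq) for seq in itertools.product("[]", repeat=n))
--     elif n ==0:
--         ell = ("".join(seq) for seq in itertools.product("()", repeat=m))
--     else:
--         ell = ("".join(seq) for seq in itertools.product("()[]", repeat= n and m ))
--
--     return ell
-- ===== SOURCE B (Python) =====
-- def brackets22(m, n):
--     # Unranking: the j-th output is the base-k numeral of j (most significant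
--     # digit first) read as characters of the chosen alphabet.
--     if m == 0:
--         alpha, length = "[]", n
--     elif n == 0:
--         alpha, length = "()", m
--     else:
--         alpha, length = "()[]", m
--     k = len(alpha)
--     out = []
--     for i in range(k ** length):
--         x, chars = i, []
--         for _ in range(length):
--             chars.append(alpha[x % k])
--             x //= k
--         out.append("".join(reversed(chars)))
--     return out
-- ===== Notes on version B (the rewrite author's own statement) =====
-- stated objective: alternative
-- what changed: itertools.product enumeration is replaced by combinatorial unranking: the result length k^L is computed up front and each index i is decoded as a base-k numeral whose digits (most significant first) index the alphabet, so no product/suffix-extension structure is built.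
import Mathlib
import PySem

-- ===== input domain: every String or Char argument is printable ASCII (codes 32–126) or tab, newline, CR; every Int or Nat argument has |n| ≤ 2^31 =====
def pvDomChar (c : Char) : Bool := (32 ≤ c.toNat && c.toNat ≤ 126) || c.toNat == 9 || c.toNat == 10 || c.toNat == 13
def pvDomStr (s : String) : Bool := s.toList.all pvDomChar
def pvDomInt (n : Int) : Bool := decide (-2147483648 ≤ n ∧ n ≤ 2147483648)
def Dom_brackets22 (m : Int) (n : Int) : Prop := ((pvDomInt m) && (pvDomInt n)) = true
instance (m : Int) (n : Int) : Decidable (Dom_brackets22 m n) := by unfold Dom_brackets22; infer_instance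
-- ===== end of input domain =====

-- B replaces itertools.product by combinatorial unranking: each of the k^L output
-- indices is decoded as a base-k numeral over the alphabet (objective: alternative).

-- ===== PORT A =====
-- itertools.product(pool, repeat=r) in pool-lexicographic order (first slot varies slowest),
-- as lists of characters; exact transliteration of product's documented expansion.
def pvProduct (pool : List Char) : Nat → List (List Char)
  | 0 => [[]]
  | r + 1 => pool.flatMap (fun c => (pvProduct pool r).map (fun t => c :: t))

def brackets22 (m : Int) (n : Int) : List String :=
  if m = 0 then
    (pvProduct "[]".toList n.toNat).map String.mk        -- "".join(seq)
  else if n = 0 then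
    (pvProduct "()".toList m.toNat).map String.mk
  else
    (pvProduct "()[]".toList (if n = 0 then n else m).toNat).map String.mk  -- n and m

-- ===== PORT B =====
-- inner loop of Source B: L times append alpha[x % k] then x //= k; join reversed.
-- alpha.getD is exact for alpha[x % k]: 0 ≤ x % k < k = alpha.length here.
def pvUnrank (alpha : List Char) (k : Nat) (L : Nat) (i : Nat) : String :=
  String.mk ((((List.range L).foldl
      (fun st _ => (st.1 / k, st.2 ++ [alpha.getD (st.1 % k) ' '])) (i, ([] : List Char))).2).reverse)

def brackets22_alt (m : Int) (n : Int) : List String :=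
  let p : String × Int :=
    if m = 0 then ("[]", n) else if n = 0 then ("()", m) else ("()[]", m)
  let alpha := p.1.toList
  let k := alpha.length
  let L := p.2.toNat
  (List.range (k ^ L)).map (pvUnrank alpha k L)

-- ===== PRECONDITION & SPEC =====
-- Pre_ excludes exactly the inputs on which the selected repeat count is negative:
-- there itertools.product raises ValueError at call time (A returns nothing), and B raises too.
def Pre_brackets22 (m : Int) (n : Int) : Prop := 0 ≤ (if m = 0 then n else m)
instance (m : Int) (n : Int) : Decidable (Pre_brackets22 m n) := by unfold Pre_brackets22; infer_instance
def pvWitness_brackets22 : Int × Int := (2, 1)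

def Spec_brackets22 (m : Int) (n : Int) (out : List String) : Prop := out = brackets22_alt m n
instance (m : Int) (n : Int) (out : List String) : Decidable (Spec_brackets22 m n out) := by unfold Spec_brackets22; infer_instance

-- ===== CLAIM (what is proved, stated in full; the proofs are below) =====
def Claim_equal_brackets22 : Prop := ∀ (m : Int) (n : Int), Dom_brackets22 m n → Pre_brackets22 m n → Spec_brackets22 m n (brackets22 m n)

-- ===== LEMMAS AND PROOFS =====

-- proof-side view of the inner loop: base-k digits, least significant first
def pvDigs (alpha : List Char) (k : Nat) : Nat → Nat → List Char
  | 0, _ => []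
  | L+1, x => alpha.getD (x % k) ' ' :: pvDigs alpha k L (x / k)

theorem foldl_ignore {α β : Type} (g : β → β) (l : List α) (init : β) :
    l.foldl (fun st _ => g st) init = g^[l.length] init := by
  induction l generalizing init with
  | nil => rfl
  | cons a t ih => simp [List.foldl, ih, Function.iterate_succ_apply]

theorem iterate_digs (alpha : List Char) (k : Nat) (L : Nat) :
    ∀ (x : Nat) (cs : List Char),
    (((fun st : Nat × List Char => (st.1 / k, st.2 ++ [alpha.getD (st.1 % k) ' ']))^[L]) (x, cs)).2
      = cs ++ pvDigs alpha k L x := by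
  induction L with
  | zero => intro x cs; simp [pvDigs]
  | succ L ih =>
    intro x cs
    rw [Function.iterate_succ_apply]
    simp only [pvDigs]
    rw [ih (x / k) (cs ++ [alpha.getD (x % k) ' '])]
    simp

theorem pvUnrank_eq (alpha : List Char) (k L i : Nat) :
    pvUnrank alpha k L i = String.mk (pvDigs alpha k L i).reverse := by
  unfold pvUnrank
  rw [foldl_ignore, List.length_range, iterate_digs]
  simp

theorem digs_split (alpha : List Char) (k : Nat) (hk : 0 < k) :
    ∀ (L c j : Nat), c < k → j < k ^ L →
    pvDigs alpha k (L + 1) (c * k ^ L + j) = pvDigs alpha k L j ++ [alpha.getD c ' '] := by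
  intro L
  induction L with
  | zero =>
    intro c j hc hj
    have hj0 : j = 0 := by simpa using hj
    subst hj0
    simp [pvDigs, Nat.mod_eq_of_lt hc]
  | succ L ih =>
    intro c j hc hj
    have hkL : k ^ (L + 1) = k ^ L * k := pow_succ k L
    have hmod : (c * k ^ (L + 1) + j) % k = j % k := by
      rw [hkL, ← Nat.mul_assoc]
      simp
    have hdiv : (c * k ^ (L + 1) + j) / k = c * k ^ L + j / k := by
      rw [hkL, ← Nat.mul_assoc, Nat.mul_comm (c * k ^ L) k, Nat.mul_add_div hk]
    have hj' : j / k < k ^ L := by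
      rw [hkL, Nat.mul_comm] at hj
      exact Nat.div_lt_of_lt_mul hj
    show pvDigs alpha k ((L+1) + 1) (c * k ^ (L+1) + j) = _
    rw [pvDigs, hmod, hdiv, ih c (j / k) hc hj']
    rfl

theorem range_mul_flatMap (a b : Nat) :
    List.range (a * b) = (List.range a).flatMap (fun c => (List.range b).map (fun j => c * b + j)) := by
  induction a with
  | zero => simp
  | succ a ih =>
    rw [Nat.succ_mul, List.range_add, ih, List.range_succ]
    simp

theorem map_getD_range (alpha : List Char) :
    (List.range alpha.length).map (fun c => alpha.getD c ' ') = alpha := by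
  apply List.ext_getElem
  · simp
  · intro i p1 p2
    simp at p1
    simp [List.getD_eq_getElem?_getD, p1]

theorem getD_map_range_flatMap {β : Type} (alpha : List Char) (f : Char → List β) :
    (List.range alpha.length).flatMap (fun c => f (alpha.getD c ' ')) = alpha.flatMap f := by
  conv_rhs => rw [← map_getD_range alpha]
  rw [List.flatMap_map]

theorem unrank_map (alpha : List Char) (hk : 0 < alpha.length) (L : Nat) :
    (List.range (alpha.length ^ L)).map (fun i => (pvDigs alpha alpha.length L i).reverse)
      = pvProduct alpha L := by
  set k := alpha.length with hkdef
  induction L with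
  | zero => simp [pvDigs, pvProduct]
  | succ L ih =>
    have hpow : k ^ (L + 1) = k * k ^ L := by rw [pow_succ, Nat.mul_comm]
    rw [hpow, range_mul_flatMap, List.map_flatMap]
    rw [pvProduct, ← getD_map_range_flatMap alpha (fun c => (pvProduct alpha L).map (fun t => c :: t))]
    simp only [List.flatMap_def]
    congr 1
    apply List.map_congr_left
    intro c hc
    rw [List.mem_range] at hc
    rw [List.map_map, ← ih]
    rw [List.map_map]
    apply List.map_congr_left
    intro j hj
    rw [List.mem_range] at hj
    simp only [Function.comp]
    rw [digs_split alpha k (by omega) L c j hc hj]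
    simp

theorem unrank_map_str (alpha : List Char) (hk : 0 < alpha.length) (L : Nat) :
    (List.range (alpha.length ^ L)).map (pvUnrank alpha alpha.length L)
      = (pvProduct alpha L).map String.mk := by
  rw [← unrank_map alpha hk L, List.map_map]
  apply List.map_congr_left
  intro i _
  simp [pvUnrank_eq]

theorem brackets22_eq_alt (m n : Int) : brackets22 m n = brackets22_alt m n := by
  unfold brackets22 brackets22_alt
  by_cases hm : m = 0
  · simpa [hm] using (unrank_map_str "[]".toList (by decide) n.toNat).symm
  · by_cases hn : n = 0
    · simpa [hm, hn] using (unrank_map_str "()".toList (by decide) m.toNat).symm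
    · simpa [hm, hn] using (unrank_map_str "()[]".toList (by decide) m.toNat).symm

-- ===== VERDICT (by name: the statement is the Claim_ definition above) =====
theorem brackets22_spec : Claim_equal_brackets22 := by
  intro m n _ _
  unfold Spec_brackets22
  exact brackets22_eq_alt m n
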